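-- pv_equiv track=rewrite | github.com/audacity/audacity | scripts/mw2html_audacity/htmldata.py | _tuple_replace
-- ===== SOURCE A (Python) =====
-- def _tuple_replace(s, Lindices, Lreplace):
--     """
--     Replace slices of a string with new substrings.
--
--     Given a list of slice tuples in C{Lindices}, replace each slice
--     in C{s} with the corresponding replacement substring from
--     C{Lreplace}.
--
--     Example:
--
--      >>> _tuple_replace('0123456789',[(4,5),(6,9)],['abc', 'def'])
--      '0123abc5def9'
--     """
--     ans = []
--     Lindices = Lindices[:]
--     Lindices.sort()
--     if len(Lindices) != len(Lreplace):
--         raise ValueError('lists differ in length')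
--     for i in range(len(Lindices) - 1):
--         if Lindices[i][1] > Lindices[i + 1][0]:
--             raise ValueError('tuples overlap')
--         if Lindices[i][1] < Lindices[i][0]:
--             raise ValueError('invalid tuple')
--         if min(Lindices[i][0], Lindices[i][1]) < 0 or                    \
--            max(Lindices[i][0], Lindices[i][1]) >= len(s):
--             raise ValueError('bad index')
--
--     j = 0
--     offset = 0
--     for i in range(len(Lindices)):
--
--         len1 = Lindices[i][1] - Lindices[i][0]
--         len2 = len(Lreplace[i])
--
--         ans.append(s[j:Lindices[i][0] + offset])
--         ans.append(Lreplace[i])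
--
--         j = Lindices[i][1]
--     ans.append(s[j:])
--     return ''.join(ans)
-- ===== SOURCE B (Python) =====
-- def _tuple_replace(s, Lindices, Lreplace):
--     # validation kept byte-for-byte from the original (last tuple deliberately unvalidated);
--     # the build is different: splice replacements right-to-left, no piece list / j pointer.
--     Lindices = Lindices[:]
--     Lindices.sort()
--     if len(Lindices) != len(Lreplace):
--         raise ValueError('lists differ in length')
--     for i in range(len(Lindices) - 1):
--         if Lindices[i][1] > Lindices[i + 1][0]:
--             raise ValueError('tuples overlap')
--         if Lindices[i][1] < Lindices[i][0]:
--             raise ValueError('invalid tuple')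
--         if min(Lindices[i][0], Lindices[i][1]) < 0 or \
--            max(Lindices[i][0], Lindices[i][1]) >= len(s):
--             raise ValueError('bad index')
--     for (start, end), repl in reversed(list(zip(Lindices, Lreplace))):
--         s = s[:start] + repl + s[end:]
--     return s
-- ===== Notes on version B (the rewrite author's own statement) =====
-- stated objective: simpler
-- what changed: B keeps A's sort and validation but discards the piece-list/j-pointer/offset gap accumulation, instead splicing each replacement directly into the string right-to-left (s = s[:start] + repl + s[end:] over the reversed sorted pairs).
import Mathlib
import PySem

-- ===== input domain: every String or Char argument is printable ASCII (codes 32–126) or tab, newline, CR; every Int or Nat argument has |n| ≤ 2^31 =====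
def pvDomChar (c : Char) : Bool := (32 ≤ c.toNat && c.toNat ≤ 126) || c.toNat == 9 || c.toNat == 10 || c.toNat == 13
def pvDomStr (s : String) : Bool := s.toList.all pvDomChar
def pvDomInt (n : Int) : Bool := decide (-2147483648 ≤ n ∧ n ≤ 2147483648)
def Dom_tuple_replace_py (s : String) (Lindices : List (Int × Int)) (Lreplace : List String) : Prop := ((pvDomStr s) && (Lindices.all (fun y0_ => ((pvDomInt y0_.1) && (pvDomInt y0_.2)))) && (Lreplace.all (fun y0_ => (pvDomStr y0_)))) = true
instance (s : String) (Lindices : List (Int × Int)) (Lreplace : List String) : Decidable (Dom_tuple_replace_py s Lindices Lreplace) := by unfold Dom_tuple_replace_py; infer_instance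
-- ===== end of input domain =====

-- B replaces A's piece-list/j-pointer/offset accumulation by splicing each (slice, replacement)
-- pair into the string right-to-left over the reversed sorted pairs (objective: simpler).


-- ===== PORT A =====
-- A's main loop: state (ans, j, offset); offset stays 0 (A never changes it) but is kept as a
-- parameter, and 'st + offset' is kept literally.  The ValueError branches of A's validation
-- loop are exactly the inputs excluded by Pre_tuple_replace_py, so the port carries no checks.
def pvAGo (cs : List Char) : List (Int × Int) → List String → Int → Int → List Char
  | [], _, j, _ => PySem.List.slice cs (some j) none
  | (st, en) :: L', r :: R', j, offset =>
      PySem.List.slice cs (some j) (some (st + offset)) ++ r.toList ++ pvAGo cs L' R' en offset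
  | _ :: _, [], _, _ => []   -- unreachable: Pre_ forces equal lengths (A raises ValueError)

def tuple_replace_py (s : String) (Lindices : List (Int × Int)) (Lreplace : List String) : String :=
  let L := PySem.List.sorted2 Lindices Prod.fst Prod.snd   -- Lindices[:].sort() (tuples, lexicographic)
  String.mk (pvAGo s.toList L Lreplace 0 0)

-- ===== PORT B =====
-- one splice  s = s[:start] + repl + s[end:]
def pvBStep (cs : List Char) (p : (Int × Int) × String) : List Char :=
  PySem.List.slice cs none (some p.1.1) ++ p.2.toList ++ PySem.List.slice cs (some p.1.2) none

def tuple_replace_py_alt (s : String) (Lindices : List (Int × Int)) (Lreplace : List String) : String :=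
  let L := PySem.List.sorted2 Lindices Prod.fst Prod.snd
  String.mk (((L.zip Lreplace).reverse).foldl pvBStep s.toList)

-- ===== PRECONDITION & SPEC =====
-- Pre_ excludes exactly the inputs on which A raises ValueError: unequal list lengths, or a
-- failure of A's validation loop over the sorted slice list (overlap of consecutive slices,
-- end < start, or an index out of [0, len(s)) — checked for every tuple except the last).
def Pre_tuple_replace_py (s : String) (Lindices : List (Int × Int)) (Lreplace : List String) : Prop :=
  Lindices.length = Lreplace.length ∧
  (∀ pq ∈ (PySem.List.sorted2 Lindices Prod.fst Prod.snd).zip (PySem.List.sorted2 Lindices Prod.fst Prod.snd).tail, pq.1.2 ≤ pq.2.1) ∧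
  ∀ p ∈ (PySem.List.sorted2 Lindices Prod.fst Prod.snd).dropLast,
    p.1 ≤ p.2 ∧ 0 ≤ p.1 ∧ p.2 < (s.toList.length : Int)
instance (s : String) (Lindices : List (Int × Int)) (Lreplace : List String) : Decidable (Pre_tuple_replace_py s Lindices Lreplace) := by unfold Pre_tuple_replace_py; infer_instance

def pvWitness_tuple_replace_py : String × (List (Int × Int)) × List String :=
  ("0123456789", [((4 : Int), (5 : Int)), ((6 : Int), (9 : Int))], ["abc", "def"])

def Spec_tuple_replace_py (s : String) (Lindices : List (Int × Int)) (Lreplace : List String) (out : String) : Prop := out = tuple_replace_py_alt s Lindices Lreplace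
instance (s : String) (Lindices : List (Int × Int)) (Lreplace : List String) (out : String) : Decidable (Spec_tuple_replace_py s Lindices Lreplace out) := by unfold Spec_tuple_replace_py; infer_instance

-- ===== CLAIM (what is proved, stated in full; the proofs are below) =====
def Claim_equal_tuple_replace_py : Prop := ∀ (s : String) (Lindices : List (Int × Int)) (Lreplace : List String), Dom_tuple_replace_py s Lindices Lreplace → Pre_tuple_replace_py s Lindices Lreplace → Spec_tuple_replace_py s Lindices Lreplace (tuple_replace_py s Lindices Lreplace)

-- ===== LEMMAS AND PROOFS =====

-- abbreviation used only by the proofs: B's fold on the zipped pair list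
def pvBFold (cs : List Char) (P : List ((Int × Int) × String)) : List Char :=
  P.reverse.foldl pvBStep cs

lemma pvBFold_nil (cs : List Char) : pvBFold cs [] = cs := rfl

lemma pvBFold_cons (cs : List Char) (p : (Int × Int) × String) (P : List ((Int × Int) × String)) :
    pvBFold cs (p :: P) = pvBStep (pvBFold cs P) p := by
  simp [pvBFold, List.foldl_append]

-- B's splices touch only positions ≥ first start: the prefix below the first start is s's own.
lemma pvPrefix (L : List (Int × Int)) (R : List String) (cs : List Char) (k : Int)
    (hk0 : 0 ≤ k) (hklen : k ≤ (cs.length : Int))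
    (hhead : ∀ p ∈ L.head?, k ≤ p.1)
    (hchain : ∀ pq ∈ L.zip L.tail, pq.1.2 ≤ pq.2.1)
    (hvalid : ∀ p ∈ L.dropLast, p.1 ≤ p.2) :
    (pvBFold cs (L.zip R)).take k.toNat = cs.take k.toNat := by
  induction L generalizing R with
  | nil => simp [pvBFold_nil]
  | cons p L' ih =>
    obtain ⟨st, en⟩ := p
    cases R with
    | nil => simp [pvBFold_nil]
    | cons r R' =>
      have hkst : k ≤ st := hhead (st, en) (by simp)
      have hst0 : 0 ≤ st := le_trans hk0 hkst
      rw [List.zip_cons_cons, pvBFold_cons]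
      cases L' with
      | nil =>
        simp only [List.zip_nil_left, pvBFold_nil, pvBStep, List.append_assoc]
        have hXlen : k.toNat ≤ (PySem.List.slice cs none (some st)).length := by
          rw [PySem.List.slice_to cs hst0, List.length_take]
          omega
        rw [List.take_append_of_le_length hXlen, PySem.List.slice_to cs hst0,
          List.take_take]
        congr 1
        omega
      | cons q L'' =>
        have hval_here : st ≤ en := hvalid (st, en) (by
          rw [List.dropLast_cons_of_ne_nil (by simp)]; simp)
        have henq : en ≤ q.1 := hchain ((st, en), q) (by simp)
        have ih' := ih R'
          (by
            intro p hp
            simp only [List.head?_cons, Option.mem_def, Option.some.injEq] at hp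
            subst hp
            omega)
          (by
            intro pq hpq
            exact hchain pq (by simpa using List.mem_cons_of_mem _ hpq))
          (by
            intro p hp
            apply hvalid
            rw [List.dropLast_cons_of_ne_nil (by simp)]
            exact List.mem_cons_of_mem _ hp)
        have hlen : k.toNat ≤ (pvBFold cs ((q :: L'').zip R')).length := by
          have := congrArg List.length ih'
          rw [List.length_take, List.length_take] at this
          omega
        have hXlen : k.toNat ≤ (PySem.List.slice (pvBFold cs ((q :: L'').zip R')) none (some st)).length := by
          rw [PySem.List.slice_to _ hst0, List.length_take]
          omega
        simp only [pvBStep, List.append_assoc]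
        rw [List.take_append_of_le_length hXlen, PySem.List.slice_to _ hst0,
          List.take_take]
        have hmin : min k.toNat st.toNat = k.toNat := by omega
        rw [hmin, ih']

-- main invariant: A's gap-accumulating loop from cursor j equals B's spliced string cut at j.
lemma pvMain (L : List (Int × Int)) (R : List String) (cs : List Char) (j : Int)
    (hlen : L.length = R.length)
    (hj0 : 0 ≤ j) (hjlen : j ≤ (cs.length : Int))
    (hhead : ∀ p ∈ L.head?, j ≤ p.1)
    (hchain : ∀ pq ∈ L.zip L.tail, pq.1.2 ≤ pq.2.1)
    (hvalid : ∀ p ∈ L.dropLast, p.1 ≤ p.2 ∧ 0 ≤ p.1 ∧ p.2 < (cs.length : Int)) :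
    pvAGo cs L R j 0 = PySem.List.slice (pvBFold cs (L.zip R)) (some j) none := by
  induction L generalizing R j with
  | nil => simp [pvAGo, pvBFold_nil]
  | cons p L' ih =>
    obtain ⟨st, en⟩ := p
    cases R with
    | nil => exact absurd hlen (by simp)
    | cons r R' =>
      have hjst : j ≤ st := hhead (st, en) (by simp)
      have hst0 : 0 ≤ st := le_trans hj0 hjst
      rw [List.zip_cons_cons, pvBFold_cons]
      cases L' with
      | nil =>
        -- single remaining tuple: it is never validated, but st ≥ j ≥ 0 suffices
        cases R' with
        | nil =>
          simp only [pvAGo, pvBStep, List.zip_nil_left, pvBFold_nil, add_zero,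
            List.append_assoc]
          rw [PySem.List.slice_from _ hj0, PySem.List.slice_to cs hst0]
          have hXlen : j.toNat ≤ (cs.take st.toNat).length := by
            rw [List.length_take]; omega
          rw [List.drop_append_of_le_length hXlen, List.drop_take,
            PySem.List.slice_toNat cs hj0 hst0]
        | cons _ _ => exact absurd hlen (by simp)
      | cons q L'' =>
        have hv := hvalid (st, en) (by rw [List.dropLast_cons_of_ne_nil (by simp)]; simp)
        obtain ⟨hsten, hst0', henlen⟩ := hv
        have hen0 : 0 ≤ en := le_trans hst0' hsten
        have henq : en ≤ q.1 := hchain ((st, en), q) (by simp)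
        have hpre := pvPrefix (q :: L'') R' cs st hst0
          (by omega)
          (by intro p hp; simp only [List.head?_cons, Option.mem_def, Option.some.injEq] at hp
              subst hp; omega)
          (by intro pq hpq
              exact hchain pq (by simpa using List.mem_cons_of_mem _ hpq))
          (by intro p hp
              have := hvalid p (by rw [List.dropLast_cons_of_ne_nil (by simp)]
                                   exact List.mem_cons_of_mem _ hp)
              exact this.1)
        have ih' := ih R' en (by simpa using hlen) hen0 (by omega)
          (by intro p hp; simp only [List.head?_cons, Option.mem_def, Option.some.injEq] at hp
              subst hp; omega)
          (by intro pq hpq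
              exact hchain pq (by simpa using List.mem_cons_of_mem _ hpq))
          (by intro p hp
              exact hvalid p (by rw [List.dropLast_cons_of_ne_nil (by simp)]
                                 exact List.mem_cons_of_mem _ hp))
        simp only [pvAGo, pvBStep, add_zero, List.append_assoc]
        rw [PySem.List.slice_from _ hj0, PySem.List.slice_to _ hst0, hpre]
        have hXlen : j.toNat ≤ (cs.take st.toNat).length := by
          rw [List.length_take]; omega
        rw [List.drop_append_of_le_length hXlen, List.drop_take,
          PySem.List.slice_toNat cs hj0 hst0, ih']

-- ===== VERDICT (by name: the statement is the Claim_ definition above) =====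
theorem tuple_replace_py_spec : Claim_equal_tuple_replace_py := by
  intro s Lindices Lreplace _hdom hpre
  obtain ⟨hlen0, hchain, hvalid⟩ := hpre
  unfold Spec_tuple_replace_py tuple_replace_py tuple_replace_py_alt
  have hlen : (PySem.List.sorted2 Lindices Prod.fst Prod.snd).length = Lreplace.length := by
    rw [(PySem.List.sorted2_perm Lindices Prod.fst Prod.snd false).length_eq]
    exact hlen0
  apply congrArg String.mk
  show pvAGo s.toList (PySem.List.sorted2 Lindices Prod.fst Prod.snd) Lreplace 0 0 =
    pvBFold s.toList ((PySem.List.sorted2 Lindices Prod.fst Prod.snd).zip Lreplace)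
  generalize hLdef : PySem.List.sorted2 Lindices Prod.fst Prod.snd = L at *
  generalize s.toList = cs at *
  cases L with
  | nil =>
    simp only [pvAGo, List.zip_nil_left, pvBFold_nil, PySem.List.slice_zero_start,
      PySem.List.slice_none_none]
  | cons p L' =>
    cases Lreplace with
    | nil => exact absurd hlen (by simp)
    | cons r R' =>
      cases L' with
      | nil =>
        cases R' with
        | nil =>
          obtain ⟨st, en⟩ := p
          simp only [pvAGo, List.zip_cons_cons, List.zip_nil_left, pvBFold_cons, pvBFold_nil,
            pvBStep, add_zero, PySem.List.slice_zero_start]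
        | cons _ _ => exact absurd hlen (by simp)
      | cons q L'' =>
        have hp0 : 0 ≤ p.1 :=
          (hvalid p (by rw [List.dropLast_cons_of_ne_nil (by simp)]; simp)).2.1
        rw [pvMain (p :: q :: L'') (r :: R') cs 0 (by simpa using hlen) le_rfl
          (by positivity)
          (by intro x hx; simp only [List.head?_cons, Option.mem_def, Option.some.injEq] at hx
              subst hx; exact hp0)
          hchain hvalid]
        rw [PySem.List.slice_zero_start, PySem.List.slice_none_none]
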